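-- pv_equiv track=rewrite | github.com/triton-inference-server/server | docs/generate_docs.py | _is_in_code_block
-- ===== SOURCE A (Python) =====
-- def _is_in_code_block(match_start: int, content: str) -> bool:
--     """
--     Determine if a character position is inside a fenced code block.
--
--     Checks if the given position in the content is within a markdown
--     fenced code block (using ``` or ~~~ delimiters). This is used to
--     skip processing hyperlinks that appear in code examples.
--
--     Args:
--         match_start: Character position in content to check
--         content: Full document content
--
--     Returns:
--         True if position is inside a code block, False otherwise
--     """
--     # Find all code block ranges
--     code_block_ranges = []
--
--     # Find fenced code blocks (``` or ~~~)
--     lines = content.split("\n")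
--     in_fenced_block = False
--     fence_start = None
--     fence_char = None  # Track which fence character we're using
--
--     for i, line in enumerate(lines):
--         stripped = line.strip()
--         # Check for fenced code block start/end
--         if stripped.startswith("```"):
--             if not in_fenced_block:
--                 # Opening fence
--                 in_fenced_block = True
--                 fence_start = i
--                 fence_char = "`"
--             elif fence_char == "`":
--                 # Closing fence (same type)
--                 code_block_ranges.append((fence_start, i))
--                 in_fenced_block = False
--                 fence_start = None
--                 fence_char = None
--         elif stripped.startswith("~~~"):
--             if not in_fenced_block:
--                 # Opening fence
--                 in_fenced_block = True
--                 fence_start = i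
--                 fence_char = "~"
--             elif fence_char == "~":
--                 # Closing fence (same type)
--                 code_block_ranges.append((fence_start, i))
--                 in_fenced_block = False
--                 fence_start = None
--                 fence_char = None
--
--     # Close any open fenced blocks at end of file
--     if in_fenced_block and fence_start is not None:
--         code_block_ranges.append((fence_start, len(lines) - 1))
--
--     # Check if match_start is inside any code block
--     match_line = content[:match_start].count("\n")
--     for start_line, end_line in code_block_ranges:
--         if start_line <= match_line <= end_line:
--             return True
--
--     return False
-- ===== SOURCE B (Python) =====
-- def _is_in_code_block(match_start: int, content: str) -> bool:
--     """Single prefix pass: fold the fence state over the lines before the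
--     match line, then judge the match line directly (no range list)."""
--     lines = content.split("\n")
--     match_line = content[:match_start].count("\n")
--     fence = None
--     for line in lines[:match_line]:
--         s = line.strip()
--         if fence is None:
--             if s.startswith("```"):
--                 fence = "`"
--             elif s.startswith("~~~"):
--                 fence = "~"
--         elif s.startswith(fence * 3):
--             fence = None
--     if fence is not None:
--         return True
--     s = lines[match_line].strip()
--     return s.startswith("```") or s.startswith("~~~")
-- ===== Notes on version B (the rewrite author's own statement) =====
-- stated objective: simpler
-- what changed: A collects every fenced range in a list over all lines and then scans that list for the match line; B folds a single fence-state over only the lines before the match line and judges the match line directly, with no range list.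
import Mathlib
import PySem

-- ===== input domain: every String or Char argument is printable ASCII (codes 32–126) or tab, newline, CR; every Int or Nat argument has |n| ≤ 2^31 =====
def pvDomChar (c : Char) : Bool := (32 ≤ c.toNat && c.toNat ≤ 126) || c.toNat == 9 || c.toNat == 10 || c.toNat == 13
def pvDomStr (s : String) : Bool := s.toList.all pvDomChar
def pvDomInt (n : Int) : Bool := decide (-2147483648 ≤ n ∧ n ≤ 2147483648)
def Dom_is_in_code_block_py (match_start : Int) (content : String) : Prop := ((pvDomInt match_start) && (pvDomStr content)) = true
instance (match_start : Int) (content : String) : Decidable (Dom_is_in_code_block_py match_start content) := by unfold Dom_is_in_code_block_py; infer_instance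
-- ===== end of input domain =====

-- B replaces A's "collect all fenced ranges, then scan the range list" with a single
-- fold of the fence state over the lines BEFORE the match line plus a direct check of
-- the match line itself (objective: simpler — shorter, no range list).

-- ===== PORT A =====
-- state: (code_block_ranges, in_fenced_block, fence_start, fence_char)
def pvStepA (st : List (Int × Int) × Bool × Option Int × Option Char) (p : Int × List Char) :
    List (Int × Int) × Bool × Option Int × Option Char :=
  match st, p with
  | (ranges, inb, fs, fc), (i, line) =>
    let stripped := PySem.Chars.strip line
    if PySem.Chars.startswith stripped ['`', '`', '`'] then
      if !inb then (ranges, true, some i, some '`')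
      else if fc == some '`' then (ranges ++ [(fs.getD 0, i)], false, none, none)
      else (ranges, inb, fs, fc)
    else if PySem.Chars.startswith stripped ['~', '~', '~'] then
      if !inb then (ranges, true, some i, some '~')
      else if fc == some '~' then (ranges ++ [(fs.getD 0, i)], false, none, none)
      else (ranges, inb, fs, fc)
    else (ranges, inb, fs, fc)

def is_in_code_block_py (match_start : Int) (content : String) : Bool :=
  let lines := PySem.Chars.splitOn content.toList ['\n']
  let st := List.foldl pvStepA ([], false, none, none) (PySem.List.enumerate lines 0)
  -- close any open fenced block at end of file
  let ranges := if st.2.1 && st.2.2.1.isSome then st.1 ++ [(st.2.2.1.getD 0, (lines.length : Int) - 1)] else st.1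
  let matchLine : Int := (PySem.Chars.count (PySem.Chars.slice content.toList none (some match_start)) ['\n'] : Nat)
  ranges.any (fun r => decide (r.1 ≤ matchLine) && decide (matchLine ≤ r.2))

-- ===== PORT B =====
def pvStepB (fence : Option Char) (line : List Char) : Option Char :=
  let s := PySem.Chars.strip line
  match fence with
  | none =>
    if PySem.Chars.startswith s ['`', '`', '`'] then some '`'
    else if PySem.Chars.startswith s ['~', '~', '~'] then some '~'
    else none
  | some c => if PySem.Chars.startswith s [c, c, c] then none else some c

def is_in_code_block_py_alt (match_start : Int) (content : String) : Bool :=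
  let lines := PySem.Chars.splitOn content.toList ['\n']
  let matchLine : Nat := PySem.Chars.count (PySem.Chars.slice content.toList none (some match_start)) ['\n']
  let fence := List.foldl pvStepB none (PySem.List.slice lines none (some (matchLine : Int)))
  match fence with
  | some _ => true
  | none =>
    match PySem.List.pyGet? lines (matchLine : Int) with
    | some line =>
      let s := PySem.Chars.strip line
      PySem.Chars.startswith s ['`', '`', '`'] || PySem.Chars.startswith s ['~', '~', '~']
    | none => false

-- ===== PRECONDITION & SPEC =====
def Spec_is_in_code_block_py (match_start : Int) (content : String) (out : Bool) : Prop := out = is_in_code_block_py_alt match_start content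
instance (match_start : Int) (content : String) (out : Bool) : Decidable (Spec_is_in_code_block_py match_start content out) := by unfold Spec_is_in_code_block_py; infer_instance

-- ===== CLAIM (what is proved, stated in full; the proofs are below) =====
def Claim_equal_is_in_code_block_py : Prop := ∀ (match_start : Int) (content : String), Dom_is_in_code_block_py match_start content → Spec_is_in_code_block_py match_start content (is_in_code_block_py match_start content)

-- ===== LEMMAS AND PROOFS =====

def pvContains (m : Int) (r : Int × Int) : Bool := decide (r.1 ≤ m) && decide (m ≤ r.2)

-- A's final answer from a loop state: close a dangling open fence at `last`, then scan
def pvFinishA (st : List (Int × Int) × Bool × Option Int × Option Char) (last m : Int) : Bool :=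
  (if st.2.1 && st.2.2.1.isSome then st.1 ++ [(st.2.2.1.getD 0, last)] else st.1).any (pvContains m)

def pvIsFence (l : List Char) : Bool :=
  PySem.Chars.startswith (PySem.Chars.strip l) ['`', '`', '`'] ||
  PySem.Chars.startswith (PySem.Chars.strip l) ['~', '~', '~']

lemma pv_count_go_single (c : Char) : ∀ (l : List Char) (fuel acc : Nat), l.length ≤ fuel →
    PySem.Chars.count.go [c] fuel l acc = acc + l.count c := by
  intro l
  induction l with
  | nil => intro fuel acc _; cases fuel <;> simp [PySem.Chars.count.go]
  | cons x t ih =>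
    intro fuel acc hf
    cases fuel with
    | zero => simp at hf
    | succ f =>
      simp only [PySem.Chars.count.go]
      have hpre : ([c].isPrefixOf (x :: t)) = (c == x) := by simp [List.isPrefixOf]
      rw [hpre]
      simp only [List.length_cons] at hf
      by_cases h : c = x
      · subst h
        rw [if_pos (by simp)]
        have hd : List.drop [c].length (c :: t) = t := by simp
        rw [hd, ih f (acc + 1) (by omega)]
        simp
        omega
      · rw [if_neg (by simp [h])]
        rw [ih f acc (by omega)]
        have hx : ¬ x = c := fun hh => h hh.symm
        simp [hx]

lemma pv_count_single (l : List Char) (c : Char) : PySem.Chars.count l [c] = l.count c := by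
  unfold PySem.Chars.count
  simp only [List.isEmpty_cons, if_false, Bool.false_eq_true]
  exact (pv_count_go_single c l l.length 0 le_rfl).trans (by omega)

lemma pv_splitOn_go_single_length (c : Char) : ∀ (l : List Char) (fuel : Nat) (cur : List Char) (acc : List (List Char)),
    l.length < fuel →
    (PySem.Chars.splitOn.go [c] fuel l cur acc).length = acc.length + 1 + l.count c := by
  intro l
  induction l with
  | nil =>
    intro fuel cur acc hf
    cases fuel with
    | zero => simp at hf
    | succ f => simp [PySem.Chars.splitOn.go]
  | cons x t ih =>
    intro fuel cur acc hf
    cases fuel with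
    | zero => simp at hf
    | succ f =>
      simp only [PySem.Chars.splitOn.go]
      have hpre : ([c].isPrefixOf (x :: t)) = (c == x) := by simp [List.isPrefixOf]
      rw [hpre]
      simp only [List.length_cons] at hf
      by_cases h : c = x
      · subst h
        rw [if_pos (by simp)]
        have hd : List.drop [c].length (c :: t) = t := by simp
        rw [hd, ih f [] (cur.reverse :: acc) (by omega)]
        simp
        omega
      · rw [if_neg (by simp [h])]
        rw [ih f (x :: cur) acc (by omega)]
        have hx : ¬ x = c := fun hh => h hh.symm
        simp [hx]

lemma pv_splitOn_single_length (l : List Char) (c : Char) :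
    (PySem.Chars.splitOn l [c]).length = l.count c + 1 := by
  unfold PySem.Chars.splitOn
  rw [pv_splitOn_go_single_length c l (l.length + 1) [] [] (by omega)]
  simp
  omega

lemma pv_matchline_lt (cs : List Char) (b : Int) :
    PySem.Chars.count (PySem.Chars.slice cs none (some b)) ['\n'] < (PySem.Chars.splitOn cs ['\n']).length := by
  rw [pv_count_single, pv_splitOn_single_length]
  have hsub : (PySem.Chars.slice cs none (some b)).Sublist cs := by
    unfold PySem.Chars.slice PySem.List.slice
    exact (List.take_sublist _ _).trans (List.drop_sublist _ _)
  have := hsub.count_le '\n'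
  omega

lemma pv_finish_open (ranges : List (Int × Int)) (c : Char) (k last m : Int) (hm : m ≤ last) :
    pvFinishA (ranges, true, some k, some c) last m
      = (ranges.any (pvContains m) || decide (k ≤ m)) := by
  simp only [pvFinishA, Option.isSome_some, Bool.and_true, if_true, List.any_append,
    List.any_cons, List.any_nil, Bool.or_false]
  simp [pvContains, hm]
  rfl

lemma pv_phase2 : ∀ (ls : List (List Char)) (pos : Int) (ranges : List (Int × Int))
    (inb : Bool) (fs : Option Int) (fc : Option Char) (m : Nat),
    inb = fc.isSome → fs.isSome = fc.isSome → (m : Int) < pos → (∀ k, fs = some k → k < pos) →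
    pvFinishA (List.foldl pvStepA (ranges, inb, fs, fc) (PySem.List.enumerate ls pos)) (pos + ls.length - 1) m
      = (ranges.any (pvContains m) || (inb && decide ((fs.getD 0) ≤ (m : Int)))) := by
  intro ls
  induction ls with
  | nil =>
    intro pos ranges inb fs fc m hinb hfs hm hk
    rw [PySem.List.enumerate_nil, List.foldl_nil]
    cases inb with
    | false =>
      have hfc : fc = none := by cases fc with | none => rfl | some c => simp at hinb
      subst hfc
      have hfs0 : fs = none := by cases fs with | none => rfl | some k => simp at hfs
      subst hfs0
      simp [pvFinishA]
    | true =>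
      obtain ⟨c, hc⟩ := Option.isSome_iff_exists.mp (by rw [← hinb])
      obtain ⟨k, hkk⟩ := Option.isSome_iff_exists.mp (by rw [hfs, ← hinb])
      subst hc hkk
      have h5 : ((m : Nat) : Int) ≤ pos + ((List.length ([] : List (List Char)) : Nat) : Int) - 1 := by
        simp only [List.length_nil, Nat.cast_zero]; omega
      rw [pv_finish_open ranges c k _ _ h5]
      simp only [Bool.true_and, Option.getD_some]
      rfl
  | cons l t ih =>
    intro pos ranges inb fs fc m hinb hfs hm hk
    rw [PySem.List.enumerate_cons, List.foldl_cons]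
    have hlast : pos + (((l :: t).length : Nat) : Int) - 1 = (pos + 1) + ((t.length : Nat) : Int) - 1 := by
      simp; ring
    rw [hlast]
    by_cases h1 : PySem.Chars.startswith (PySem.Chars.strip l) ['`', '`', '`'] = true
    · cases inb with
      | false =>
        have hst : pvStepA (ranges, false, fs, fc) (pos, l) = (ranges, true, some pos, some '`') := by
          simp [pvStepA, h1]
        rw [hst, ih (pos + 1) ranges true (some pos) (some '`') m rfl rfl (by omega)
            (by intro k hk'; injection hk' with h; omega)]
        rw [Bool.eq_iff_iff]
        simp only [Bool.or_eq_true, Bool.and_eq_true, decide_eq_true_eq, Option.getD_some]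
        have hnp : ¬ (pos ≤ (m : Int)) := by omega
        tauto
      | true =>
        obtain ⟨c, hc⟩ := Option.isSome_iff_exists.mp (by rw [← hinb])
        obtain ⟨k, hkk⟩ := Option.isSome_iff_exists.mp (by rw [hfs, ← hinb])
        subst hc hkk
        by_cases h2 : c = '`'
        · subst h2
          have hst : pvStepA (ranges, true, some k, some '`') (pos, l) = (ranges ++ [(k, pos)], false, none, none) := by
            simp [pvStepA, h1]
          rw [hst, ih (pos + 1) (ranges ++ [(k, pos)]) false none none m rfl rfl (by omega)
              (by intro k hk'; simp at hk')]
          have h3 : decide ((m : Int) ≤ pos) = true := decide_eq_true (by omega)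
          simp only [List.any_append, List.any_cons, List.any_nil, Bool.or_false,
            Bool.false_and, pvContains, h3, Bool.and_true, Bool.true_and, Option.getD_some]
          rfl
        · have hst : pvStepA (ranges, true, some k, some c) (pos, l) = (ranges, true, some k, some c) := by
            simp [pvStepA, h1, h2]
          rw [hst, ih (pos + 1) ranges true (some k) (some c) m rfl rfl (by omega)
              (by intro k' hk'; injection hk' with h; have := hk k rfl; omega)]
    · by_cases h2 : PySem.Chars.startswith (PySem.Chars.strip l) ['~', '~', '~'] = true
      · cases inb with
        | false =>
          have hst : pvStepA (ranges, false, fs, fc) (pos, l) = (ranges, true, some pos, some '~') := by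
            simp [pvStepA, h1, h2]
          rw [hst, ih (pos + 1) ranges true (some pos) (some '~') m rfl rfl (by omega)
              (by intro k hk'; injection hk' with h; omega)]
          rw [Bool.eq_iff_iff]
          simp only [Bool.or_eq_true, Bool.and_eq_true, decide_eq_true_eq, Option.getD_some]
          have hnp : ¬ (pos ≤ (m : Int)) := by omega
          tauto
        | true =>
          obtain ⟨c, hc⟩ := Option.isSome_iff_exists.mp (by rw [← hinb])
          obtain ⟨k, hkk⟩ := Option.isSome_iff_exists.mp (by rw [hfs, ← hinb])
          subst hc hkk
          by_cases h3 : c = '~'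
          · subst h3
            have hst : pvStepA (ranges, true, some k, some '~') (pos, l) = (ranges ++ [(k, pos)], false, none, none) := by
              simp [pvStepA, h1, h2]
            rw [hst, ih (pos + 1) (ranges ++ [(k, pos)]) false none none m rfl rfl (by omega)
                (by intro k hk'; simp at hk')]
            have h4 : decide ((m : Int) ≤ pos) = true := decide_eq_true (by omega)
            simp only [List.any_append, List.any_cons, List.any_nil, Bool.or_false,
              Bool.false_and, pvContains, h4, Bool.and_true, Bool.true_and, Option.getD_some]
            rfl
          · have hst : pvStepA (ranges, true, some k, some c) (pos, l) = (ranges, true, some k, some c) := by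
              simp [pvStepA, h1, h2, h3]
            rw [hst, ih (pos + 1) ranges true (some k) (some c) m rfl rfl (by omega)
                (by intro k' hk'; injection hk' with h; have := hk k rfl; omega)]
      · have hst : pvStepA (ranges, inb, fs, fc) (pos, l) = (ranges, inb, fs, fc) := by
          simp [pvStepA, h1, h2]
        rw [hst, ih (pos + 1) ranges inb fs fc m hinb hfs (by omega)
            (by intro k' hk'; have := hk k' hk'; omega)]

lemma pv_not_both_fences {s : List Char} (h1 : PySem.Chars.startswith s ['`', '`', '`'] = true)
    (h2 : PySem.Chars.startswith s ['~', '~', '~'] = true) : False := by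
  cases s with
  | nil => simp [PySem.Chars.startswith, List.isPrefixOf] at h1
  | cons x xs =>
    simp only [PySem.Chars.startswith, List.isPrefixOf, Bool.and_eq_true, beq_iff_eq] at h1 h2
    exact absurd (h1.1.trans h2.1.symm) (by decide)

lemma pv_any_lt (ranges : List (Int × Int)) (m : Int) (hr : ∀ r ∈ ranges, r.2 < m) :
    ranges.any (pvContains m) = false := by
  rw [List.any_eq_false]
  intro r hrr
  have := hr r hrr
  simp [pvContains]
  omega

lemma pv_phase1 : ∀ (ls : List (List Char)) (j : Nat) (hj : j < ls.length) (pos : Int)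
    (ranges : List (Int × Int)) (inb : Bool) (fs : Option Int) (fc : Option Char) (m : Nat),
    (m : Int) = pos + j → inb = fc.isSome → fs.isSome = fc.isSome →
    (∀ k, fs = some k → k < pos) → (∀ r ∈ ranges, r.2 < pos) →
    (fc = none ∨ fc = some '`' ∨ fc = some '~') →
    pvFinishA (List.foldl pvStepA (ranges, inb, fs, fc) (PySem.List.enumerate ls pos)) (pos + ls.length - 1) m
      = ((List.foldl pvStepB fc (ls.take j)).isSome || pvIsFence ls[j]) := by
  intro ls
  induction ls with
  | nil => intro j hj; simp at hj
  | cons l t ih =>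
    intro j hj pos ranges inb fs fc m hm hinb hfs hk hr hfc3
    rw [PySem.List.enumerate_cons, List.foldl_cons]
    have hlast : pos + (((l :: t).length : Nat) : Int) - 1 = (pos + 1) + ((t.length : Nat) : Int) - 1 := by
      simp; ring
    rw [hlast]
    cases j with
    | zero =>
      simp only [List.take_zero, List.foldl_nil, List.getElem_cons_zero]
      have hmpos : (m : Int) = pos := by simpa using hm
      rcases hfc3 with hfc | hfc | hfc
      · subst hfc
        have hinb' : inb = false := by simpa using hinb
        subst hinb'
        have hfs0 : fs = none := by cases fs with | none => rfl | some k => simp at hfs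
        subst hfs0
        by_cases h1 : PySem.Chars.startswith (PySem.Chars.strip l) ['`', '`', '`'] = true
        · have hst : pvStepA (ranges, false, none, none) (pos, l) = (ranges, true, some pos, some '`') := by
            simp [pvStepA, h1]
          rw [hst, pv_phase2 t (pos + 1) ranges true (some pos) (some '`') m rfl rfl (by omega)
              (by intro k hk'; injection hk' with h; omega)]
          have hIs : pvIsFence l = true := by simp [pvIsFence, h1]
          simp [hIs, show pos ≤ (m : Int) by omega]
        · by_cases h2 : PySem.Chars.startswith (PySem.Chars.strip l) ['~', '~', '~'] = true
          · have hst : pvStepA (ranges, false, none, none) (pos, l) = (ranges, true, some pos, some '~') := by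
              simp [pvStepA, h1, h2]
            rw [hst, pv_phase2 t (pos + 1) ranges true (some pos) (some '~') m rfl rfl (by omega)
                (by intro k hk'; injection hk' with h; omega)]
            have hIs : pvIsFence l = true := by simp [pvIsFence, h2]
            simp [hIs, show pos ≤ (m : Int) by omega]
          · have hst : pvStepA (ranges, false, none, none) (pos, l) = (ranges, false, none, none) := by
              simp [pvStepA, h1, h2]
            rw [hst, pv_phase2 t (pos + 1) ranges false none none m rfl rfl (by omega)
                (by intro k hk'; simp at hk')]
            have hany : ranges.any (pvContains m) = false :=
              pv_any_lt ranges m (by intro r hrr; have := hr r hrr; omega)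
            have hIs : pvIsFence l = false := by simp [pvIsFence, h1, h2]
            simp [hany, hIs]
      · subst hfc
        have hinb' : inb = true := by simpa using hinb
        subst hinb'
        obtain ⟨k, hkk⟩ := Option.isSome_iff_exists.mp (by rw [hfs]; rfl)
        subst hkk
        have hkpos := hk k rfl
        by_cases h1 : PySem.Chars.startswith (PySem.Chars.strip l) ['`', '`', '`'] = true
        · have hst : pvStepA (ranges, true, some k, some '`') (pos, l) = (ranges ++ [(k, pos)], false, none, none) := by
            simp [pvStepA, h1]
          rw [hst, pv_phase2 t (pos + 1) (ranges ++ [(k, pos)]) false none none m rfl rfl (by omega)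
              (by intro k' hk'; simp at hk')]
          have h7 : pvContains (m : Int) (k, pos) = true := by simp [pvContains]; omega
          simp [List.any_append, h7]
        · have hst : pvStepA (ranges, true, some k, some '`') (pos, l) = (ranges, true, some k, some '`') := by
            by_cases h2 : PySem.Chars.startswith (PySem.Chars.strip l) ['~', '~', '~'] = true <;>
              simp [pvStepA, h1, h2]
          rw [hst, pv_phase2 t (pos + 1) ranges true (some k) (some '`') m rfl rfl (by omega)
              (by intro k' hk'; injection hk' with h; omega)]
          simp [show k ≤ (m : Int) by omega]
      · subst hfc
        have hinb' : inb = true := by simpa using hinb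
        subst hinb'
        obtain ⟨k, hkk⟩ := Option.isSome_iff_exists.mp (by rw [hfs]; rfl)
        subst hkk
        have hkpos := hk k rfl
        by_cases h1 : PySem.Chars.startswith (PySem.Chars.strip l) ['~', '~', '~'] = true
        · have hst : pvStepA (ranges, true, some k, some '~') (pos, l) = (ranges ++ [(k, pos)], false, none, none) := by
            by_cases h2 : PySem.Chars.startswith (PySem.Chars.strip l) ['`', '`', '`'] = true
            · exact (pv_not_both_fences h2 h1).elim
            · simp [pvStepA, h1, h2]
          rw [hst, pv_phase2 t (pos + 1) (ranges ++ [(k, pos)]) false none none m rfl rfl (by omega)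
              (by intro k' hk'; simp at hk')]
          have h7 : pvContains (m : Int) (k, pos) = true := by simp [pvContains]; omega
          simp [List.any_append, h7]
        · have hst : pvStepA (ranges, true, some k, some '~') (pos, l) = (ranges, true, some k, some '~') := by
            by_cases h2 : PySem.Chars.startswith (PySem.Chars.strip l) ['`', '`', '`'] = true <;>
              simp [pvStepA, h1, h2]
          rw [hst, pv_phase2 t (pos + 1) ranges true (some k) (some '~') m rfl rfl (by omega)
              (by intro k' hk'; injection hk' with h; omega)]
          simp [show k ≤ (m : Int) by omega]
    | succ n =>
      simp only [List.take_succ_cons, List.foldl_cons, List.getElem_cons_succ]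
      have hj' : n < t.length := by simpa using hj
      have hm' : (m : Int) = (pos + 1) + n := by push_cast at hm ⊢; omega
      rcases hfc3 with hfc | hfc | hfc
      · subst hfc
        have hinb' : inb = false := by simpa using hinb
        subst hinb'
        have hfs0 : fs = none := by cases fs with | none => rfl | some k => simp at hfs
        subst hfs0
        by_cases h1 : PySem.Chars.startswith (PySem.Chars.strip l) ['`', '`', '`'] = true
        · have hst : pvStepA (ranges, false, none, none) (pos, l) = (ranges, true, some pos, some '`') := by
            simp [pvStepA, h1]
          have hstB : pvStepB none l = some '`' := by simp [pvStepB, h1]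
          rw [hst, hstB]
          exact ih n hj' (pos + 1) ranges true (some pos) (some '`') m hm' rfl rfl
            (by intro k hk'; injection hk' with h; omega)
            (by intro r hrr; have := hr r hrr; omega) (Or.inr (Or.inl rfl))
        · by_cases h2 : PySem.Chars.startswith (PySem.Chars.strip l) ['~', '~', '~'] = true
          · have hst : pvStepA (ranges, false, none, none) (pos, l) = (ranges, true, some pos, some '~') := by
              simp [pvStepA, h1, h2]
            have hstB : pvStepB none l = some '~' := by simp [pvStepB, h1, h2]
            rw [hst, hstB]
            exact ih n hj' (pos + 1) ranges true (some pos) (some '~') m hm' rfl rfl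
              (by intro k hk'; injection hk' with h; omega)
              (by intro r hrr; have := hr r hrr; omega) (Or.inr (Or.inr rfl))
          · have hst : pvStepA (ranges, false, none, none) (pos, l) = (ranges, false, none, none) := by
              simp [pvStepA, h1, h2]
            have hstB : pvStepB none l = none := by simp [pvStepB, h1, h2]
            rw [hst, hstB]
            exact ih n hj' (pos + 1) ranges false none none m hm' rfl rfl
              (by intro k hk'; simp at hk')
              (by intro r hrr; have := hr r hrr; omega) (Or.inl rfl)
      · subst hfc
        have hinb' : inb = true := by simpa using hinb
        subst hinb'
        obtain ⟨k, hkk⟩ := Option.isSome_iff_exists.mp (by rw [hfs]; rfl)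
        subst hkk
        have hkpos := hk k rfl
        by_cases h1 : PySem.Chars.startswith (PySem.Chars.strip l) ['`', '`', '`'] = true
        · have hst : pvStepA (ranges, true, some k, some '`') (pos, l) = (ranges ++ [(k, pos)], false, none, none) := by
            simp [pvStepA, h1]
          have hstB : pvStepB (some '`') l = none := by simp [pvStepB, h1]
          rw [hst, hstB]
          exact ih n hj' (pos + 1) (ranges ++ [(k, pos)]) false none none m hm' rfl rfl
            (by intro k' hk'; simp at hk')
            (by intro r hrr
                rcases List.mem_append.mp hrr with h | h
                · have := hr r h; omega
                · have hre : r = (k, pos) := by simpa using h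
                  rw [hre]; omega)
            (Or.inl rfl)
        · have hst : pvStepA (ranges, true, some k, some '`') (pos, l) = (ranges, true, some k, some '`') := by
            by_cases h2 : PySem.Chars.startswith (PySem.Chars.strip l) ['~', '~', '~'] = true <;>
              simp [pvStepA, h1, h2]
          have hstB : pvStepB (some '`') l = some '`' := by simp [pvStepB, h1]
          rw [hst, hstB]
          exact ih n hj' (pos + 1) ranges true (some k) (some '`') m hm' rfl rfl
            (by intro k' hk'; injection hk' with h; omega)
            (by intro r hrr; have := hr r hrr; omega) (Or.inr (Or.inl rfl))
      · subst hfc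
        have hinb' : inb = true := by simpa using hinb
        subst hinb'
        obtain ⟨k, hkk⟩ := Option.isSome_iff_exists.mp (by rw [hfs]; rfl)
        subst hkk
        have hkpos := hk k rfl
        by_cases h1 : PySem.Chars.startswith (PySem.Chars.strip l) ['~', '~', '~'] = true
        · have hst : pvStepA (ranges, true, some k, some '~') (pos, l) = (ranges ++ [(k, pos)], false, none, none) := by
            by_cases h2 : PySem.Chars.startswith (PySem.Chars.strip l) ['`', '`', '`'] = true
            · exact (pv_not_both_fences h2 h1).elim
            · simp [pvStepA, h1, h2]
          have hstB : pvStepB (some '~') l = none := by simp [pvStepB, h1]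
          rw [hst, hstB]
          exact ih n hj' (pos + 1) (ranges ++ [(k, pos)]) false none none m hm' rfl rfl
            (by intro k' hk'; simp at hk')
            (by intro r hrr
                rcases List.mem_append.mp hrr with h | h
                · have := hr r h; omega
                · have hre : r = (k, pos) := by simpa using h
                  rw [hre]; omega)
            (Or.inl rfl)
        · have hst : pvStepA (ranges, true, some k, some '~') (pos, l) = (ranges, true, some k, some '~') := by
            by_cases h2 : PySem.Chars.startswith (PySem.Chars.strip l) ['`', '`', '`'] = true <;>
              simp [pvStepA, h1, h2]
          have hstB : pvStepB (some '~') l = some '~' := by simp [pvStepB, h1]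
          rw [hst, hstB]
          exact ih n hj' (pos + 1) ranges true (some k) (some '~') m hm' rfl rfl
            (by intro k' hk'; injection hk' with h; omega)
            (by intro r hrr; have := hr r hrr; omega) (Or.inr (Or.inr rfl))

-- ===== VERDICT (by name: the statement is the Claim_ definition above) =====
theorem is_in_code_block_py_spec : Claim_equal_is_in_code_block_py := by
  intro ms content _
  have hmlt := pv_matchline_lt content.toList ms
  unfold Spec_is_in_code_block_py
  have hA : is_in_code_block_py ms content
      = pvFinishA
          (List.foldl pvStepA ([], false, none, none)
            (PySem.List.enumerate (PySem.Chars.splitOn content.toList ['\n']) 0))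
          (((PySem.Chars.splitOn content.toList ['\n']).length : Int) - 1)
          ((PySem.Chars.count (PySem.Chars.slice content.toList none (some ms)) ['\n'] : Nat) : Int) := rfl
  have hslice : PySem.List.slice (PySem.Chars.splitOn content.toList ['\n']) none
        (some ((PySem.Chars.count (PySem.Chars.slice content.toList none (some ms)) ['\n'] : Nat) : Int))
      = List.take (PySem.Chars.count (PySem.Chars.slice content.toList none (some ms)) ['\n'])
          (PySem.Chars.splitOn content.toList ['\n']) := by
    rw [PySem.List.slice_to _ (by positivity)]
    simp
  have hget : PySem.List.pyGet? (PySem.Chars.splitOn content.toList ['\n'])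
        ((PySem.Chars.count (PySem.Chars.slice content.toList none (some ms)) ['\n'] : Nat) : Int)
      = some ((PySem.Chars.splitOn content.toList ['\n'])[PySem.Chars.count (PySem.Chars.slice content.toList none (some ms)) ['\n']]'hmlt) := by
    rw [PySem.List.pyGet?_natCast]
    exact List.getElem?_eq_getElem hmlt
  have hB : is_in_code_block_py_alt ms content
      = ((List.foldl pvStepB none
            (List.take (PySem.Chars.count (PySem.Chars.slice content.toList none (some ms)) ['\n'])
              (PySem.Chars.splitOn content.toList ['\n']))).isSome
          || pvIsFence ((PySem.Chars.splitOn content.toList ['\n'])[PySem.Chars.count (PySem.Chars.slice content.toList none (some ms)) ['\n']]'hmlt)) := by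
    show (match List.foldl pvStepB none
            (PySem.List.slice (PySem.Chars.splitOn content.toList ['\n']) none
              (some ((PySem.Chars.count (PySem.Chars.slice content.toList none (some ms)) ['\n'] : Nat) : Int))) with
          | some _ => true
          | none =>
            match PySem.List.pyGet? (PySem.Chars.splitOn content.toList ['\n'])
                ((PySem.Chars.count (PySem.Chars.slice content.toList none (some ms)) ['\n'] : Nat) : Int) with
            | some line =>
              PySem.Chars.startswith (PySem.Chars.strip line) ['`', '`', '`'] ||
              PySem.Chars.startswith (PySem.Chars.strip line) ['~', '~', '~']
            | none => false) = _
    rw [hslice, hget]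
    cases List.foldl pvStepB none
        (List.take (PySem.Chars.count (PySem.Chars.slice content.toList none (some ms)) ['\n'])
          (PySem.Chars.splitOn content.toList ['\n'])) with
    | some c => rfl
    | none => rfl
  rw [hA, hB]
  have hmain := pv_phase1 (PySem.Chars.splitOn content.toList ['\n'])
      (PySem.Chars.count (PySem.Chars.slice content.toList none (some ms)) ['\n']) hmlt 0 [] false none none
      (PySem.Chars.count (PySem.Chars.slice content.toList none (some ms)) ['\n'])
      (by simp) rfl rfl (by intro k hk'; simp at hk') (by intro r hrr; simp at hrr) (Or.inl rfl)
  rw [show (0 : Int) + ((PySem.Chars.splitOn content.toList ['\n']).length : Int) - 1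
        = ((PySem.Chars.splitOn content.toList ['\n']).length : Int) - 1 from by ring] at hmain
  exact hmain
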